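-- pv_equiv track=rewrite | github.com/YashpalYadav050/HomeworkIRE | indexing_and_retrieval/self_index.py | _phrase_match
-- ===== SOURCE A (Python) =====
-- from typing import Dict, Iterable, List, Tuple
--
-- def _phrase_match(term_postings: List[Dict[int, List[int]]]) -> List[int]:
--     # Intersect docs then check positional adjacency
--     if not term_postings:
--         return []
--     common_docs = set(term_postings[0].keys())
--     for p in term_postings[1:]:
--         common_docs &= set(p.keys())
--     result: List[int] = []
--     for d in common_docs:
--         pos_lists = [p[d] for p in term_postings]
--         # Check if any position p0 has p1=p0+1, p2=p0+2, ...
--         first = pos_lists[0]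
--         rest = pos_lists[1:]
--         ok = False
--         s_rest = [set(pl) for pl in rest]
--         for p0 in first:
--             ok = True
--             for k, s in enumerate(s_rest, start=1):
--                 if (p0 + k) not in s:
--                     ok = False
--                     break
--             if ok:
--                 break
--         if ok:
--             result.append(d)
--     return sorted(result)
-- ===== SOURCE B (Python) =====
-- from typing import Dict, List
--
-- def _phrase_match(term_postings: List[Dict[int, List[int]]]) -> List[int]:
--     # Fold shifted position sets across terms: cand holds feasible phrase-start positions.
--     if not term_postings:
--         return []
--     common = set(term_postings[0].keys())
--     for p in term_postings[1:]:
--         common &= set(p.keys())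
--     result: List[int] = []
--     for d in sorted(common):
--         cand = set(term_postings[0][d])
--         for k, p in enumerate(term_postings[1:], start=1):
--             cand &= {q - k for q in p[d]}
--             if not cand:
--                 break
--         if cand:
--             result.append(d)
--     return result
-- ===== Notes on version B (the rewrite author's own statement) =====
-- stated objective: alternative
-- what changed: Instead of scanning the first term's positions and testing each candidate against every later term's position set with an early break, B folds shifted position sets across the terms, intersecting a set of feasible phrase-start positions (cand &= {q-k for q in term[d]}) and keeping a doc iff the set stays non-empty; docs are visited in sorted order so no final sort is needed.
import Mathlib
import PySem

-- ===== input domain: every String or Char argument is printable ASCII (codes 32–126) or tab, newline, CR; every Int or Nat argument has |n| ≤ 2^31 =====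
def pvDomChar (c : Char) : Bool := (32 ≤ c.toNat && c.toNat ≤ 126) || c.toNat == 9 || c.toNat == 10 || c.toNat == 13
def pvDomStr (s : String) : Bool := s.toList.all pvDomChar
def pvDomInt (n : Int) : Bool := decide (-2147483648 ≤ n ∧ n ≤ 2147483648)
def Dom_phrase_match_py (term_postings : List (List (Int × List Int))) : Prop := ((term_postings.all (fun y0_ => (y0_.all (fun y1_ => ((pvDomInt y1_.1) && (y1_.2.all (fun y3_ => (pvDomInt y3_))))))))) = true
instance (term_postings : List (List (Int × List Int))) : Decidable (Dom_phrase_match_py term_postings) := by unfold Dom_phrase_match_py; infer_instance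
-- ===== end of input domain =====

-- B replaces A's scan of the first term's positions with per-term membership tests by a fold of
-- shifted position sets across the terms (a candidate phrase-start set), visiting docs in sorted
-- order instead of sorting at the end ("alternative", not claimed faster).

-- ===== PORT A =====
-- inner loop: 'for k, s in enumerate(s_rest, start=1): if (p0 + k) not in s: ok = False; break'
def pvAInner (p0 : Int) (k : Int) : List (PySem.Set Int) → Bool
  | [] => true
  | s :: t => if PySem.Set.contains s (p0 + k) then pvAInner p0 (k + 1) t else false

-- outer loop: 'for p0 in first: ok = True; …; if ok: break'  (ok after the loop)
def pvAOuter (s_rest : List (PySem.Set Int)) : List Int → Bool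
  | [] => false
  | p0 :: t => if pvAInner p0 1 s_rest then true else pvAOuter s_rest t

-- p[d] is written Dict.getD p d []: d is drawn from the intersection of all key sets, so the
-- Python lookup never raises and the default is never used.
def phrase_match_py (term_postings : List (List (Int × List Int))) : List Int :=
  match term_postings with
  | [] => []
  | p0 :: ps =>
    let common : PySem.Set Int :=
      ps.foldl (fun acc p => PySem.Set.inter acc (PySem.Set.ofList (PySem.Dict.mk p).keys))
        (PySem.Set.ofList (PySem.Dict.mk p0).keys)
    -- 'for d in common_docs: … if ok: result.append(d)'; result only consumed through sorted()
    let result : List Int :=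
      common.foldl (fun res d =>
        let first := (PySem.Dict.mk p0).getD d []
        let s_rest := ps.map (fun p => PySem.Set.ofList ((PySem.Dict.mk p).getD d []))
        if pvAOuter s_rest first then res ++ [d] else res) []
    PySem.List.sorted result (fun x => x) false

-- ===== PORT B =====
-- 'for k, p in enumerate(term_postings[1:], start=1): cand &= {q - k for q in p[d]}; if not cand: break'
def pvBCand (d : Int) (cand : PySem.Set Int) (k : Int) : List (List (Int × List Int)) → PySem.Set Int
  | [] => cand
  | p :: t =>
    let cand' := PySem.Set.inter cand (PySem.Set.ofList (((PySem.Dict.mk p).getD d []).map (fun q => q - k)))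
    if cand'.isEmpty then cand' else pvBCand d cand' (k + 1) t

def phrase_match_py_alt (term_postings : List (List (Int × List Int))) : List Int :=
  match term_postings with
  | [] => []
  | p0 :: ps =>
    let common : PySem.Set Int :=
      ps.foldl (fun acc p => PySem.Set.inter acc (PySem.Set.ofList (PySem.Dict.mk p).keys))
        (PySem.Set.ofList (PySem.Dict.mk p0).keys)
    (PySem.List.sorted common (fun x => x) false).foldl (fun res d =>
      let cand := pvBCand d (PySem.Set.ofList ((PySem.Dict.mk p0).getD d [])) 1 ps
      if !cand.isEmpty then res ++ [d] else res) []

-- ===== PRECONDITION & SPEC =====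
-- Pre_ excludes association lists with duplicate keys in some inner list: no Python dict (A's
-- actual parameter type) produces such a list, so behaviour there is representation-dependent
-- (dict construction keeps the last value for a duplicated key, the association-list convention
-- the first).
def Pre_phrase_match_py (term_postings : List (List (Int × List Int))) : Prop :=
  ∀ p ∈ term_postings, (p.map Prod.fst).Nodup
instance (term_postings : List (List (Int × List Int))) : Decidable (Pre_phrase_match_py term_postings) := by unfold Pre_phrase_match_py; infer_instance

def pvWitness_phrase_match_py : (List (List (Int × List Int))) :=
  [[((1 : Int), [(0 : Int), 5]), (2, [3])], [(1, [1])]]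

def Spec_phrase_match_py (term_postings : List (List (Int × List Int))) (out : List Int) : Prop := out = phrase_match_py_alt term_postings
instance (term_postings : List (List (Int × List Int))) (out : List Int) : Decidable (Spec_phrase_match_py term_postings out) := by unfold Spec_phrase_match_py; infer_instance

-- ===== CLAIM (what is proved, stated in full; the proofs are below) =====
def Claim_equal_phrase_match_py : Prop := ∀ (term_postings : List (List (Int × List Int))), Dom_phrase_match_py term_postings → Pre_phrase_match_py term_postings → Spec_phrase_match_py term_postings (phrase_match_py term_postings)

-- ===== LEMMAS AND PROOFS =====

-- membership in B's folded candidate set = A's inner adjacency check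
theorem mem_pvBCand (d : Int) (t : List (List (Int × List Int))) :
    ∀ (cand : PySem.Set Int) (k x : Int),
      x ∈ pvBCand d cand k t ↔
        x ∈ cand ∧ pvAInner x k (t.map (fun p => PySem.Set.ofList ((PySem.Dict.mk p).getD d []))) = true := by
  induction t with
  | nil => intro cand k x; simp [pvBCand, pvAInner]
  | cons p t' ih =>
    intro cand k x
    simp only [pvBCand, List.map_cons, pvAInner]
    set vals := (PySem.Dict.mk p).getD d [] with hvals
    have hshift : ∀ y : Int, y ∈ PySem.Set.ofList (vals.map (fun q => q - k)) ↔ (y + k) ∈ vals := by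
      intro y
      rw [PySem.Set.mem_ofList, List.mem_map]
      constructor
      · rintro ⟨q, hq, rfl⟩; simpa using hq
      · intro h; exact ⟨y + k, h, by ring⟩
    by_cases he : (PySem.Set.inter cand (PySem.Set.ofList (vals.map (fun q => q - k)))).isEmpty = true
    · rw [List.isEmpty_iff] at he
      simp only [he, if_pos List.isEmpty_nil, List.not_mem_nil, false_iff]
      rintro ⟨hc, hrest⟩
      by_cases hm : (x + k) ∈ vals
      · have : x ∈ PySem.Set.inter cand (PySem.Set.ofList (vals.map (fun q => q - k))) :=
          (PySem.Set.mem_inter _ _ _).mpr ⟨hc, (hshift x).mpr hm⟩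
        simp [he] at this
      · rw [if_neg (by simpa [PySem.Set.contains_iff, PySem.Set.mem_ofList] using hm)] at hrest
        exact Bool.false_ne_true hrest
    · rw [if_neg he, ih]
      rw [PySem.Set.mem_inter _ _ x, hshift]
      by_cases hm : (x + k) ∈ vals
      · simp [hm, PySem.Set.mem_ofList]
      · simp [hm, PySem.Set.mem_ofList]

-- A's outer loop is an existence test over first
theorem pvAOuter_eq_any (s_rest : List (PySem.Set Int)) (l : List Int) :
    pvAOuter s_rest l = true ↔ ∃ x ∈ l, pvAInner x 1 s_rest = true := by
  induction l with
  | nil => simp [pvAOuter]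
  | cons a t ih =>
    simp only [pvAOuter]
    by_cases h : pvAInner a 1 s_rest = true
    · simp [h]
    · simp [h, ih]

-- the per-doc predicates of the two ports agree
theorem pred_eq (p0 : List (Int × List Int)) (ps : List (List (Int × List Int))) (d : Int) :
    pvAOuter (ps.map (fun p => PySem.Set.ofList ((PySem.Dict.mk p).getD d [])))
        ((PySem.Dict.mk p0).getD d []) =
      !(pvBCand d (PySem.Set.ofList ((PySem.Dict.mk p0).getD d [])) 1 ps).isEmpty := by
  rcases Bool.eq_false_or_eq_true
      ((pvBCand d (PySem.Set.ofList ((PySem.Dict.mk p0).getD d [])) 1 ps).isEmpty) with he | he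
  · rw [he]
    rw [List.isEmpty_iff] at he
    simp only [Bool.not_true]
    rw [Bool.eq_false_iff, Ne, pvAOuter_eq_any]
    rintro ⟨x, hx, hin⟩
    have : x ∈ pvBCand d (PySem.Set.ofList ((PySem.Dict.mk p0).getD d [])) 1 ps :=
      (mem_pvBCand _ _ _ _ _).mpr ⟨(PySem.Set.mem_ofList _ _).mpr hx, hin⟩
    rw [he] at this
    exact List.not_mem_nil this
  · rw [he]
    rw [List.isEmpty_eq_false_iff_exists_mem] at he
    obtain ⟨x, hx⟩ := he
    rw [mem_pvBCand] at hx
    simp only [Bool.not_false]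
    exact (pvAOuter_eq_any _ _).mpr ⟨x, (PySem.Set.mem_ofList _ _).mp hx.1, hx.2⟩

-- sorting a filtered list = filtering the sorted list (identity key)
theorem sorted_filter_comm (p : Int → Bool) (l : List Int) :
    PySem.List.sorted (l.filter p) (fun x => x) false =
      (PySem.List.sorted l (fun x => x) false).filter p := by
  refine PySem.List.eq_of_perm_of_pairwise_le_of_injective (fun x : Int => x)
    (fun a b h => h) ?_ ?_ ?_
  · exact (PySem.List.sorted_perm _ _ _).trans
      ((PySem.List.sorted_perm l _ false).filter p).symm
  · exact PySem.List.sorted_pairwise _ _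
  · exact List.Pairwise.sublist List.filter_sublist (PySem.List.sorted_pairwise l _)

-- ===== VERDICT (by name: the statement is the Claim_ definition above) =====
theorem phrase_match_py_spec : Claim_equal_phrase_match_py := by
  intro term_postings _ _
  unfold Spec_phrase_match_py
  match term_postings with
  | [] => rfl
  | p0 :: ps =>
    simp only [phrase_match_py, phrase_match_py_alt]
    rw [PySem.List.foldl_append_if_eq_filter
      (fun d => pvAOuter (ps.map (fun p => PySem.Set.ofList ((PySem.Dict.mk p).getD d [])))
        ((PySem.Dict.mk p0).getD d []))]
    rw [PySem.List.foldl_append_if_eq_filter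
      (fun d => !(pvBCand d (PySem.Set.ofList ((PySem.Dict.mk p0).getD d [])) 1 ps).isEmpty)]
    simp only [List.nil_append]
    have hp : (fun d => pvAOuter (ps.map (fun p => PySem.Set.ofList ((PySem.Dict.mk p).getD d [])))
        ((PySem.Dict.mk p0).getD d [])) =
        (fun d => !(pvBCand d (PySem.Set.ofList ((PySem.Dict.mk p0).getD d [])) 1 ps).isEmpty) :=
      funext (fun d => pred_eq p0 ps d)
    rw [hp, sorted_filter_comm]
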